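-- pv_equiv track=rewrite | github.com/xintin/wave | wave_lang/kernel/wave/asm/scripts/compare_backends.py | find_context_around_pattern
-- ===== SOURCE A (Python) =====
-- def find_context_around_pattern(
--     asm_text: str,
--     pattern: str,
--     context_before: int = 10,
--     context_after: int = 3,
--     max_occurrences: int = 3,
-- ) -> str:
--     """Find lines matching pattern with surrounding context."""
--     lines = asm_text.split("\n")
--     results = []
--     found = 0
--
--     for i, line in enumerate(lines):
--         if pattern.lower() in line.lower():
--             if found >= max_occurrences:
--                 results.append(f"  ... and more occurrences ...")
--                 break
--             found += 1
--             results.append(f"\n--- Occurrence {found} (line {i}) ---")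
--             start = max(0, i - context_before)
--             end = min(len(lines), i + context_after + 1)
--             for j in range(start, end):
--                 marker = ">>>" if j == i else "   "
--                 results.append(f"{marker} {j:4d}: {lines[j]}")
--
--     return "\n".join(results) if results else "  (no occurrences found)"
-- ===== SOURCE B (Python) =====
-- def find_context_around_pattern(
--     asm_text: str,
--     pattern: str,
--     context_before: int = 10,
--     context_after: int = 3,
--     max_occurrences: int = 3,
-- ) -> str:
--     """Find lines matching pattern with surrounding context."""
--     lines = asm_text.split("\n")
--     text = asm_text.lower()
--     pat = pattern.lower()
--     matches = []
--     if "\n" not in pat: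
--         # One substring search over the flat lowered text; map each hit offset to
--         # its line with a two-pointer walk, then resume the search at the start of
--         # the next line.  (A pattern containing a newline can never sit inside a
--         # single line, so the flat search is skipped and there are no matches.)
--         li = 0      # current line index
--         start = 0   # offset of line li within text
--         pos = text.find(pat)
--         while pos != -1:
--             while start + len(lines[li]) < pos:
--                 start += len(lines[li]) + 1
--                 li += 1
--             matches.append(li)
--             pos = text.find(pat, start + len(lines[li]) + 1)
--     cap = max(0, max_occurrences)
--     out = []
--     for n, i in enumerate(matches[:cap], 1):
--         out.append(f"\n--- Occurrence {n} (line {i}) ---")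
--         for j in range(max(0, i - context_before), min(len(lines), i + context_after + 1)):
--             marker = ">>>" if j == i else "   "
--             out.append(f"{marker} {j:4d}: {lines[j]}")
--     if len(matches) > cap:
--         out.append("  ... and more occurrences ...")
--     return "\n".join(out) if out else "  (no occurrences found)"
-- ===== Notes on version B (the rewrite author's own statement) =====
-- stated objective: alternative
-- what changed: A tests pattern-containment line by line while scanning all lines with a found-counter and early break; B instead runs ONE flat substring search over the whole lowered text (str.find resumed from the start of the line after each hit), maps each hit offset to its line number with a two-pointer offset walk, and then renders the first max(0,max_occurrences) matched lines in a separate pass, appending the overflow marker once iff matches remain beyond the cap.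
import Mathlib
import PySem

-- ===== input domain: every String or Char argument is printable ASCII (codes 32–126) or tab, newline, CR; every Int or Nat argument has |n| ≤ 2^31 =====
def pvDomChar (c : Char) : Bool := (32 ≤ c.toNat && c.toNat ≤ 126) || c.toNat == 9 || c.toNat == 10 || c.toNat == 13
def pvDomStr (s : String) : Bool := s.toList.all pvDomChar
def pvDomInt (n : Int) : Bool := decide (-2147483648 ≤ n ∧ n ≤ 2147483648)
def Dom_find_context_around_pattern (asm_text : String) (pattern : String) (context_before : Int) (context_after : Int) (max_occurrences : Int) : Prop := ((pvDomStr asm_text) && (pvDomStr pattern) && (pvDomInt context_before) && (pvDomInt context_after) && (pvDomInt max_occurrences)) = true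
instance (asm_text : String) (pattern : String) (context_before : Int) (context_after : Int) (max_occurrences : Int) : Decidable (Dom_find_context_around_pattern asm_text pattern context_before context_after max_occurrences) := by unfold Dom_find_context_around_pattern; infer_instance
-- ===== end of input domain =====

-- ===== PORT A =====
-- B replaces A's per-line containment scan by ONE substring search over the flat
-- lowered text, mapping each hit offset to its line with a two-pointer walk;
-- objective: alternative (no speed claim).

-- shared formatting helper: Python's f"{j:4d}" (right-aligned, minimum width 4)
def pvPad4 (n : Int) : String :=
  let cs := PySem.Int.toChars n
  String.ofList (List.replicate (4 - cs.length) ' ' ++ cs)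

-- A's for-loop over enumerate(lines) with the `found` counter and `break`, as structural recursion;
-- the inner `for j in range(start, end)` append-loop is the map over pyRange.
def pvALoop (lines : List String) (pattern : String) (context_before context_after max_occurrences : Int) :
    List (Int × String) → Int → List String
  | [], _ => []
  | (i, line) :: rest, found =>
    if PySem.Str.isIn (PySem.Str.lower pattern) (PySem.Str.lower line) then
      if found ≥ max_occurrences then ["  ... and more occurrences ..."]
      else
        ("\n--- Occurrence " ++ PySem.Int.toStr (found + 1) ++ " (line " ++ PySem.Int.toStr i ++ ") ---")
        :: ((PySem.List.pyRange (max 0 (i - context_before)) (min (lines.length : Int) (i + context_after + 1)) 1).map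
              (fun j => (if j = i then ">>>" else "   ") ++ " " ++ pvPad4 j ++ ": " ++ PySem.List.pyGetD lines j ""))
        ++ pvALoop lines pattern context_before context_after max_occurrences rest (found + 1)
    else pvALoop lines pattern context_before context_after max_occurrences rest found

def find_context_around_pattern (asm_text : String) (pattern : String) (context_before : Int) (context_after : Int) (max_occurrences : Int) : String :=
  let lines := (PySem.Str.split? asm_text "\n").getD []
  let results := pvALoop lines pattern context_before context_after max_occurrences (PySem.List.enumerate lines 0) 0
  if results.isEmpty then "  (no occurrences found)" else PySem.Str.join "\n" results

-- ===== PORT B =====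
-- Source B's inner `while start + len(lines[li]) < pos` two-pointer walk (fuel = #lines bounds its steps)
def pvAdv (lines : List String) (li start pos : Int) : Nat → Int × Int
  | 0 => (li, start)
  | fuel + 1 =>
    if start + PySem.Str.len (PySem.List.pyGetD lines li "") < pos then
      pvAdv lines (li + 1) (start + PySem.Str.len (PySem.List.pyGetD lines li "") + 1) pos fuel
    else (li, start)

-- Source B's outer `while pos != -1` loop (fuel = #lines + 1 bounds its iterations: one match per line)
def pvScan (text pat : List Char) (lines : List String) (li start pos : Int) : Nat → List Int
  | 0 => []
  | fuel + 1 =>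
    if pos = -1 then []
    else
      let p := pvAdv lines li start pos lines.length
      p.1 :: pvScan text pat lines p.1 p.2
        (PySem.Chars.findFrom text pat (p.2 + PySem.Str.len (PySem.List.pyGetD lines p.1 "") + 1) none) fuel

-- Source B: flat search over text = asm_text.lower() (skipped when "\n" in pat), then render matches[:cap].
def find_context_around_pattern_alt (asm_text : String) (pattern : String) (context_before : Int) (context_after : Int) (max_occurrences : Int) : String :=
  let lines := (PySem.Str.split? asm_text "\n").getD []
  let text := PySem.Chars.lower asm_text.toList
  let pat := PySem.Chars.lower pattern.toList
  let ms : List Int :=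
    if PySem.Chars.isIn ['\n'] pat then []
    else pvScan text pat lines 0 0 (PySem.Chars.find text pat) (lines.length + 1)
  let cap : Int := max 0 max_occurrences
  let body := (PySem.List.enumerate (ms.take cap.toNat) 1).flatMap (fun p =>
      ("\n--- Occurrence " ++ PySem.Int.toStr p.1 ++ " (line " ++ PySem.Int.toStr p.2 ++ ") ---")
      :: ((PySem.List.pyRange (max 0 (p.2 - context_before)) (min (lines.length : Int) (p.2 + context_after + 1)) 1).map
            (fun j => (if j = p.2 then ">>>" else "   ") ++ " " ++ pvPad4 j ++ ": " ++ PySem.List.pyGetD lines j "")))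
  let results := body ++ (if (ms.length : Int) > cap then ["  ... and more occurrences ..."] else [])
  if results.isEmpty then "  (no occurrences found)" else PySem.Str.join "\n" results

-- ===== PRECONDITION & SPEC =====
def Spec_find_context_around_pattern (asm_text : String) (pattern : String) (context_before : Int) (context_after : Int) (max_occurrences : Int) (out : String) : Prop := out = find_context_around_pattern_alt asm_text pattern context_before context_after max_occurrences
instance (asm_text : String) (pattern : String) (context_before : Int) (context_after : Int) (max_occurrences : Int) (out : String) : Decidable (Spec_find_context_around_pattern asm_text pattern context_before context_after max_occurrences out) := by unfold Spec_find_context_around_pattern; infer_instance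

-- ===== CLAIM (what is proved, stated in full; the proofs are below) =====
def Claim_equal_find_context_around_pattern : Prop := ∀ (asm_text : String) (pattern : String) (context_before : Int) (context_after : Int) (max_occurrences : Int), Dom_find_context_around_pattern asm_text pattern context_before context_after max_occurrences → Spec_find_context_around_pattern asm_text pattern context_before context_after max_occurrences (find_context_around_pattern asm_text pattern context_before context_after max_occurrences)

-- ===== LEMMAS AND PROOFS =====
def pvSplitCh (c : Char) : List Char → List (List Char)
  | [] => [[]]
  | x :: r =>
    let ps := pvSplitCh c r
    if x = c then [] :: ps else (x :: ps.headI) :: ps.tail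

theorem pvSplitCh_ne_nil (c : Char) (l : List Char) : pvSplitCh c l ≠ [] := by
  cases l with
  | nil => simp [pvSplitCh]
  | cons x r => simp only [pvSplitCh]; split <;> simp

theorem pvSplitChGo (c : Char) : ∀ (fuel : Nat) (l : List Char), l.length ≤ fuel → ∀ (cur : List Char) (acc : List (List Char)),
    PySem.Chars.splitOn.go [c] fuel l cur acc
      = acc.reverse ++ (cur.reverse ++ (pvSplitCh c l).headI) :: (pvSplitCh c l).tail := by
  intro fuel
  induction fuel with
  | zero =>
    intro l hl cur acc
    have : l = [] := by cases l <;> simp_all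
    subst this
    simp [PySem.Chars.splitOn.go, pvSplitCh]
  | succ fuel ih =>
    intro l hl cur acc
    cases l with
    | nil => simp [PySem.Chars.splitOn.go, pvSplitCh]
    | cons x r =>
      simp only [PySem.Chars.splitOn.go]
      by_cases hx : x = c
      · subst hx
        have hpre : [x].isPrefixOf (x :: r) = true := by simp [List.isPrefixOf]
        rw [if_pos hpre]
        simp only [List.length_cons] at hl
        simp only [List.length_cons, List.drop_succ_cons, List.length_nil, List.drop_zero]
        rw [ih r (by omega) [] (cur.reverse :: acc)]
        obtain ⟨h0, t0, hps⟩ : ∃ h0 t0, pvSplitCh x r = h0 :: t0 := by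
          cases hE : pvSplitCh x r with
          | nil => exact absurd hE (pvSplitCh_ne_nil x r)
          | cons a b => exact ⟨a, b, rfl⟩
        simp [pvSplitCh, hps]
      · have hpre : [c].isPrefixOf (x :: r) = false := by
          simp [List.isPrefixOf, BEq.beq]
          intro h; exact absurd h.symm hx
        rw [if_neg (by simp [hpre])]
        simp only [List.length_cons] at hl
        rw [ih r (by omega) (x :: cur) acc]
        obtain ⟨h0, t0, hps⟩ : ∃ h0 t0, pvSplitCh c r = h0 :: t0 := by
          cases hE : pvSplitCh c r with
          | nil => exact absurd hE (pvSplitCh_ne_nil c r)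
          | cons a b => exact ⟨a, b, rfl⟩
        simp [pvSplitCh, hps, if_neg hx]

theorem pvSplitOn_eq (c : Char) (l : List Char) : PySem.Chars.splitOn l [c] = pvSplitCh c l := by
  unfold PySem.Chars.splitOn
  rw [pvSplitChGo c (l.length + 1) l (by omega) [] []]
  have := pvSplitCh_ne_nil c l
  simp
  exact (List.cons_head?_tail (by cases h : pvSplitCh c l <;> simp_all [List.headI]))

theorem pvJoin_pvSplitCh (c : Char) (l : List Char) :
    PySem.Chars.join [c] (pvSplitCh c l) = l := by
  induction l with
  | nil => simp [pvSplitCh, PySem.Chars.join_singleton]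
  | cons x r ih =>
    obtain ⟨h0, t0, hps⟩ : ∃ h0 t0, pvSplitCh c r = h0 :: t0 := by
      cases hE : pvSplitCh c r with
      | nil => exact absurd hE (pvSplitCh_ne_nil c r)
      | cons a b => exact ⟨a, b, rfl⟩
    rw [hps] at ih
    by_cases hx : x = c
    · subst hx
      simp only [pvSplitCh, hps, if_true, eq_self_iff_true]
      rw [PySem.Chars.join_cons_cons]
      simp [ih]
    · simp only [pvSplitCh, if_neg hx, hps, List.headI_cons, List.tail_cons]
      cases t0 with
      | nil =>
        rw [PySem.Chars.join_singleton] at ih ⊢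
        simp [ih]
      | cons q t1 =>
        rw [PySem.Chars.join_cons_cons] at ih ⊢
        simp only [List.cons_append, ih]

theorem pvNotMem_pvSplitCh (c : Char) (l : List Char) : ∀ p ∈ pvSplitCh c l, c ∉ p := by
  induction l with
  | nil => simp [pvSplitCh]
  | cons x r ih =>
    obtain ⟨h0, t0, hps⟩ : ∃ h0 t0, pvSplitCh c r = h0 :: t0 := by
      cases hE : pvSplitCh c r with
      | nil => exact absurd hE (pvSplitCh_ne_nil c r)
      | cons a b => exact ⟨a, b, rfl⟩
    rw [hps] at ih
    intro p hp
    by_cases hx : x = c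
    · subst hx
      simp only [pvSplitCh, hps, if_true] at hp
      rcases List.mem_cons.mp hp with h | h
      · simp [h]
      · exact ih p h
    · simp only [pvSplitCh, if_neg hx, hps, List.headI_cons, List.tail_cons, List.mem_cons] at hp
      rcases hp with h | h
      · subst h
        intro hmem
        rcases List.mem_cons.mp hmem with h | h
        · exact hx h.symm
        · exact ih h0 (List.mem_cons_self ..) h
      · exact ih p (List.mem_cons_of_mem _ h)

theorem pvSplitCh_map (c : Char) (f : Char → Char) (hf : f c = c) (hf2 : ∀ x, f x = c → x = c) :
    ∀ l : List Char, pvSplitCh c (l.map f) = (pvSplitCh c l).map (List.map f) := by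
  intro l
  induction l with
  | nil => simp [pvSplitCh]
  | cons x r ih =>
    obtain ⟨h0, t0, hps⟩ : ∃ h0 t0, pvSplitCh c r = h0 :: t0 := by
      cases hE : pvSplitCh c r with
      | nil => exact absurd hE (pvSplitCh_ne_nil c r)
      | cons a b => exact ⟨a, b, rfl⟩
    by_cases hx : x = c
    · subst hx
      simp only [List.map_cons, hf, pvSplitCh, ih]
      simp
    · have hfx : f x ≠ c := fun h => hx (hf2 x h)
      simp only [List.map_cons, pvSplitCh, if_neg hx, if_neg hfx, ih, hps]
      simp

theorem pvLowerChar_eq_newline {x : Char} (h : PySem.Chars.lowerChar x = '\n') : x = '\n' := by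
  unfold PySem.Chars.lowerChar at h
  split at h
  · next hup =>
    simp only [PySem.Chars.isupper, Bool.and_eq_true, decide_eq_true_eq] at hup
    have h1 : (65 : Nat) ≤ x.toNat := hup.1
    have h2 : x.toNat ≤ 90 := hup.2
    have hv : (x.toNat + 32).isValidChar := by
      left; omega
    have := congrArg Char.toNat h
    rw [Char.toNat_ofNat] at this
    rw [if_pos hv] at this
    have : x.toNat + 32 = 10 := this
    omega
  · exact h

theorem pvFind_eq (s sub : List Char) (k : Nat) (h1 : sub <+: s.drop k)
    (h2 : ∀ i < k, ¬ sub <+: s.drop i) : PySem.Chars.find s sub = (k : Int) := by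
  have hin : PySem.Chars.isIn sub s = true :=
    (PySem.Chars.exists_prefix_drop_iff_isIn sub s).mp ⟨k, h1⟩
  have hnn : 0 ≤ PySem.Chars.find s sub := by
    rw [PySem.Chars.find_nonneg_iff]
    exact (PySem.Chars.isIn_iff_infix sub s).mp hin
  obtain ⟨hpre, hmin⟩ := PySem.Chars.find_spec hnn
  have : (PySem.Chars.find s sub).toNat = k := by
    rcases Nat.lt_trichotomy (PySem.Chars.find s sub).toNat k with h | h | h
    · exact absurd hpre (h2 _ h)
    · exact h
    · exact absurd h1 (hmin _ h)
  omega

theorem pvNoCross {p t sub : List Char} (hn : '\n' ∉ sub) {i : Nat} (hi : i ≤ p.length)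
    (h : sub <+: (p ++ '\n' :: t).drop i) : sub <+: p.drop i := by
  rw [List.drop_append_of_le_length hi] at h
  by_cases hlen : i + sub.length ≤ p.length
  · have htake := List.prefix_iff_eq_take.mp h
    rw [List.take_append_of_le_length (by simp; omega)] at htake
    exact List.prefix_iff_eq_take.mpr htake
  · exfalso
    apply hn
    have hj : p.length - i < sub.length := by omega
    have heq := h.getElem hj
    rw [List.getElem_append_right (by simp)] at heq
    simp at heq
    exact heq ▸ List.getElem_mem hj

theorem pvFind_append_left {p t sub : List Char} (hn : '\n' ∉ sub)
    (hp : PySem.Chars.isIn sub p = true) :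
    PySem.Chars.find (p ++ '\n' :: t) sub = PySem.Chars.find p sub := by
  have hnn : 0 ≤ PySem.Chars.find p sub := by
    rw [PySem.Chars.find_nonneg_iff]
    exact (PySem.Chars.isIn_iff_infix sub p).mp hp
  obtain ⟨hpre, hmin⟩ := PySem.Chars.find_spec hnn
  have hk : (PySem.Chars.find p sub).toNat ≤ p.length := by
    have := PySem.Chars.find_le_length p sub
    omega
  rw [pvFind_eq (p ++ '\n' :: t) sub (PySem.Chars.find p sub).toNat
      (by rw [List.drop_append_of_le_length hk]
          exact hpre.trans (List.prefix_append _ _))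
      (fun i hi hcon => hmin i hi (pvNoCross hn (by omega) hcon))]
  omega

theorem pvFind_append_right {p t sub : List Char} (hn : '\n' ∉ sub)
    (hp : PySem.Chars.isIn sub p = false) :
    PySem.Chars.find (p ++ '\n' :: t) sub =
      if PySem.Chars.find t sub = -1 then -1 else (p.length : Int) + 1 + PySem.Chars.find t sub := by
  have hdropfar : ∀ m : Nat, (p ++ '\n' :: t).drop (p.length + 1 + m) = t.drop m := by
    intro m
    rw [List.append_cons, List.drop_append]
    have h1 : List.drop (p.length + 1 + m) (p ++ ['\n']) = [] := by
      apply List.drop_eq_nil_of_le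
      simp only [List.length_append, List.length_cons, List.length_nil]
      omega
    rw [h1]
    simp
  by_cases hfind : PySem.Chars.find t sub = -1
  · rw [if_pos hfind]
    rw [PySem.Chars.find_eq_neg_one_iff]
    intro hinf
    obtain ⟨j, hj⟩ := (PySem.Chars.exists_prefix_drop_iff_isIn sub _).mpr
      ((PySem.Chars.isIn_iff_infix _ _).mpr hinf)
    by_cases hjp : j ≤ p.length
    · exact absurd ((PySem.Chars.exists_prefix_drop_iff_isIn sub p).mp
        ⟨j, pvNoCross hn hjp hj⟩) (by simp [hp])
    · have hj' : sub <+: t.drop (j - p.length - 1) := by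
        have : j = p.length + 1 + (j - p.length - 1) := by omega
        rw [this, hdropfar] at hj
        exact hj
      have : PySem.Chars.isIn sub t = true :=
        (PySem.Chars.exists_prefix_drop_iff_isIn sub t).mp ⟨_, hj'⟩
      rw [PySem.Chars.find_eq_neg_one_iff] at hfind
      exact hfind ((PySem.Chars.isIn_iff_infix _ _).mp this)
  · rw [if_neg hfind]
    have hnn : 0 ≤ PySem.Chars.find t sub := by
      rcases (Int.lt_or_le (PySem.Chars.find t sub) 0) with h | h
      · exfalso
        apply hfind
        have := PySem.Chars.find_eq_neg_one_iff t sub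
        rw [PySem.Chars.find_eq_neg_one_iff]
        intro hinf
        have := (PySem.Chars.find_nonneg_iff t sub).mpr hinf
        omega
      · exact h
    obtain ⟨hpre, hmin⟩ := PySem.Chars.find_spec hnn
    rw [pvFind_eq (p ++ '\n' :: t) sub (p.length + 1 + (PySem.Chars.find t sub).toNat)
        (by rw [hdropfar]; exact hpre)
        (by intro i hi hcon
            by_cases hip : i ≤ p.length
            · exact absurd ((PySem.Chars.exists_prefix_drop_iff_isIn sub p).mp
                ⟨i, pvNoCross hn hip hcon⟩) (by simp [hp])
            · have : i = p.length + 1 + (i - p.length - 1) := by omega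
              rw [this, hdropfar] at hcon
              exact hmin _ (by omega) hcon)]
    push_cast
    omega

theorem pvDropFar (p t : List Char) (c : Char) (m : Nat) :
    (p ++ c :: t).drop (p.length + 1 + m) = t.drop m := by
  rw [List.append_cons, List.drop_append]
  have h1 : List.drop (p.length + 1 + m) (p ++ [c]) = [] := by
    apply List.drop_eq_nil_of_le
    simp only [List.length_append, List.length_cons, List.length_nil]
    omega
  rw [h1]
  simp

def pvOff (M : List (List Char)) (k : Nat) : Nat := ((M.take k).map (fun p => p.length + 1)).sum

theorem pvOff_zero (M : List (List Char)) : pvOff M 0 = 0 := by simp [pvOff]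

theorem pvOff_cons (p : List Char) (M : List (List Char)) (k : Nat) :
    pvOff (p :: M) (k + 1) = p.length + 1 + pvOff M k := by
  simp [pvOff, List.take_succ_cons]

theorem pvOff_succ (M : List (List Char)) (k : Nat) (h : k < M.length) :
    pvOff M (k + 1) = pvOff M k + M[k].length + 1 := by
  induction M generalizing k with
  | nil => simp at h
  | cons p rest ih =>
    cases k with
    | zero => simp [pvOff_cons, pvOff_zero]
    | succ k =>
      rw [pvOff_cons, pvOff_cons, ih k (by simpa using h)]
      simp
      omega

theorem pvOff_mono (M : List (List Char)) {k j : Nat} (h : k ≤ j) :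
    pvOff M k ≤ pvOff M j := by
  unfold pvOff
  have : j = k + (j - k) := by omega
  rw [this, List.take_add]
  simp

theorem pvJoin_cons (p : List Char) (M : List (List Char)) (h : M ≠ []) :
    PySem.Chars.join ['\n'] (p :: M) = p ++ '\n' :: PySem.Chars.join ['\n'] M := by
  cases M with
  | nil => exact absurd rfl h
  | cons q rest =>
    rw [PySem.Chars.join_cons_cons]
    simp

theorem pvOff_drop (M : List (List Char)) : ∀ k, k < M.length →
    (PySem.Chars.join ['\n'] M).drop (pvOff M k) = PySem.Chars.join ['\n'] (M.drop k) := by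
  induction M with
  | nil => intro k h; simp at h
  | cons p rest ih =>
    intro k hk
    cases k with
    | zero => simp [pvOff_zero]
    | succ k =>
      have hrest : rest ≠ [] := by
        intro h; subst h; simp at hk
      rw [pvOff_cons, pvJoin_cons p rest hrest, pvDropFar]
      exact ih k (by simpa using hk)

theorem pvOff_add_len (M : List (List Char)) : ∀ k, k < M.length →
    pvOff M k + (PySem.Chars.join ['\n'] (M.drop k)).length = (PySem.Chars.join ['\n'] M).length := by
  induction M with
  | nil => intro k h; simp at h
  | cons p rest ih =>
    intro k hk
    cases k with
    | zero => simp [pvOff_zero]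
    | succ k =>
      have hrest : rest ≠ [] := by
        intro h; subst h; simp at hk
      rw [pvOff_cons, pvJoin_cons p rest hrest, List.drop_succ_cons]
      have := ih k (by simpa using hk)
      simp only [List.length_append, List.length_cons]
      omega

theorem pvOff_last (M : List (List Char)) (h : M ≠ []) :
    pvOff M M.length = (PySem.Chars.join ['\n'] M).length + 1 := by
  induction M with
  | nil => exact absurd rfl h
  | cons p rest ih =>
    cases hrest : rest with
    | nil =>
      subst hrest
      simp [pvOff, PySem.Chars.join_singleton]
    | cons q rest' =>
      rw [← hrest]
      have hne : rest ≠ [] := by rw [hrest]; simp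
      rw [List.length_cons, pvOff_cons, pvJoin_cons p rest hne, ih hne]
      simp only [List.length_append, List.length_cons]
      omega

theorem pvFindJoin_none {sub : List Char} (hn : '\n' ∉ sub) :
    ∀ (M : List (List Char)), M ≠ [] → (∀ p ∈ M, PySem.Chars.isIn sub p = false) →
      PySem.Chars.find (PySem.Chars.join ['\n'] M) sub = -1 := by
  intro M
  induction M with
  | nil => intro h; exact absurd rfl h
  | cons p rest ih =>
    intro _ hall
    cases hrest : rest with
    | nil =>
      rw [PySem.Chars.join_singleton, PySem.Chars.find_eq_neg_one_iff]
      exact (PySem.Chars.isIn_eq_false_iff _ _).mp (hall p (by simp))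
    | cons q rest' =>
      rw [← hrest]
      have hne : rest ≠ [] := by rw [hrest]; simp
      rw [pvJoin_cons p rest hne, pvFind_append_right hn (hall p (by simp))]
      rw [if_pos (ih hne (fun x hx => hall x (List.mem_cons_of_mem _ hx)))]

theorem pvFindJoin_first {sub : List Char} (hn : '\n' ∉ sub) :
    ∀ (M : List (List Char)) (d : Nat) (hd : d < M.length),
      (∀ p ∈ M.take d, PySem.Chars.isIn sub p = false) →
      PySem.Chars.isIn sub (M[d]'hd) = true →
      PySem.Chars.find (PySem.Chars.join ['\n'] M) sub
        = (pvOff M d : Int) + PySem.Chars.find (M[d]'hd) sub := by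
  intro M
  induction M with
  | nil => intro d hd; simp at hd
  | cons p rest ih =>
    intro d hd hfail hmatch
    cases d with
    | zero =>
      simp only [List.getElem_cons_zero] at hmatch
      rw [pvOff_zero]
      simp only [List.getElem_cons_zero, Nat.cast_zero, zero_add]
      cases hrest : rest with
      | nil =>
        subst hrest
        rw [PySem.Chars.join_singleton]
      | cons q rest' =>
        rw [← hrest]
        have hne : rest ≠ [] := by rw [hrest]; simp
        rw [pvJoin_cons p rest hne, pvFind_append_left hn hmatch]
    | succ d =>
      have hd' : d < rest.length := by simpa using hd
      have hne : rest ≠ [] := by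
        intro h; subst h; simp at hd'
      have hp : PySem.Chars.isIn sub p = false := by
        apply hfail p
        simp [List.take_succ_cons]
      rw [pvJoin_cons p rest hne, pvFind_append_right hn hp]
      have hrec := ih d hd' (fun x hx => hfail x (by simp [List.take_succ_cons, hx]))
        (by simpa using hmatch)
      have hnn : 0 ≤ PySem.Chars.find (rest[d]'hd') sub := by
        rw [PySem.Chars.find_nonneg_iff]
        exact (PySem.Chars.isIn_iff_infix _ _).mp (by simpa using hmatch)
      rw [if_neg (by rw [hrec]; omega)]
      rw [hrec, pvOff_cons]
      simp only [List.getElem_cons_succ]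
      push_cast
      omega

def pvG (P : List Char) : Int → List String → List Int
  | _, [] => []
  | s, l :: rest =>
    (if PySem.Chars.isIn P (PySem.Chars.lower l.toList) then [s] else []) ++ pvG P (s + 1) rest

theorem pvG_eq_filter (P : List Char) (pattern : String) (hP : P = PySem.Chars.lower pattern.toList) :
    ∀ (lines : List String) (s : Int),
      ((PySem.List.enumerate lines s).filter
          (fun p => PySem.Str.isIn (PySem.Str.lower pattern) (PySem.Str.lower p.2))).map (·.1)
        = pvG P s lines := by
  intro lines
  induction lines with
  | nil => intro s; simp [pvG, PySem.List.enumerate]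
  | cons l rest ih =>
    intro s
    rw [PySem.List.enumerate_cons]
    by_cases hm : PySem.Chars.isIn P (PySem.Chars.lower l.toList) = true
    · rw [List.filter_cons_of_pos (by simpa [PySem.Str.isIn, hP] using hm)]
      simp only [pvG, hm, if_true, List.map_cons, ih]
      simp
    · rw [List.filter_cons_of_neg (by simpa [PySem.Str.isIn, hP] using hm)]
      simp only [pvG, hm, if_false, ih]
      simp

theorem pvG_nil (P : List Char) : ∀ (M : List String) (s : Int),
    (∀ l ∈ M, PySem.Chars.isIn P (PySem.Chars.lower l.toList) = false) → pvG P s M = [] := by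
  intro M
  induction M with
  | nil => intro s _; rfl
  | cons l rest ih =>
    intro s hall
    simp only [pvG, hall l (by simp), if_false]
    exact ih (s + 1) (fun x hx => hall x (List.mem_cons_of_mem _ hx))

theorem pvG_first (P : List Char) : ∀ (M : List String) (d : Nat) (hd : d < M.length) (s : Int),
    (∀ l ∈ M.take d, PySem.Chars.isIn P (PySem.Chars.lower l.toList) = false) →
    PySem.Chars.isIn P (PySem.Chars.lower ((M[d]'hd).toList)) = true →
    pvG P s M = (s + d) :: pvG P (s + d + 1) (M.drop (d + 1)) := by
  intro M
  induction M with
  | nil => intro d hd; simp at hd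
  | cons l rest ih =>
    intro d hd s hfail hmatch
    cases d with
    | zero =>
      simp only [List.getElem_cons_zero] at hmatch
      simp only [pvG, hmatch, if_true, List.drop_succ_cons, List.drop_zero]
      simp
    | succ d =>
      have hl : PySem.Chars.isIn P (PySem.Chars.lower l.toList) = false :=
        hfail l (by simp [List.take_succ_cons])
      simp only [pvG, hl, if_false, List.nil_append, List.drop_succ_cons]
      rw [ih d (by simpa using hd) (s + 1)
        (fun x hx => hfail x (by simp [List.take_succ_cons, hx]))
        (by simpa using hmatch)]
      refine congrArg₂ List.cons (by push_cast; ring) ?_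
      congr 1
      push_cast
      ring

theorem pvFindFrom_big (s sub : List Char) (k : Nat) (h : s.length < k) :
    PySem.Chars.findFrom s sub (k : Int) none = -1 := by
  unfold PySem.Chars.findFrom
  simp only []
  rw [if_pos]
  split
  · omega
  · push_cast; omega

theorem pvAdv_eq (lines : List String) (LL : List (List Char))
    (hLL : LL = lines.map (fun l => PySem.Chars.lower l.toList)) :
    ∀ (fuel : Nat) (k j : Nat), k ≤ j → ∀ (hj : j < lines.length) (pos : Int),
      (pvOff LL j : Int) ≤ pos →
      pos ≤ (pvOff LL j : Int) + ((LL[j]'(by simp [hLL]; omega)).length : Int) →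
      j - k < fuel →
      pvAdv lines (k : Int) (pvOff LL k : Int) pos fuel = ((j : Int), (pvOff LL j : Int)) := by
  intro fuel
  induction fuel with
  | zero => intro k j hk hj pos h1 h2 hf; omega
  | succ fuel ih =>
    intro k j hk hj pos h1 h2 hf
    have hklen : k < lines.length := by omega
    have hlen : PySem.Str.len (PySem.List.pyGetD lines (k : Int) "")
        = ((LL[k]'(by simp [hLL]; omega)).length : Int) := by
      rw [PySem.List.pyGetD_natCast, List.getD_eq_getElem _ _ hklen]
      subst hLL
      simp [PySem.Str.len, PySem.Chars.lower]
    rcases Nat.lt_or_ge k j with hkj | hkj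
    · have hcond : (pvOff LL k : Int) + PySem.Str.len (PySem.List.pyGetD lines (k : Int) "") < pos := by
        rw [hlen]
        have hsucc : pvOff LL (k + 1) = pvOff LL k + (LL[k]'(by simp [hLL]; omega)).length + 1 := by
          apply pvOff_succ
        have hmono : pvOff LL (k + 1) ≤ pvOff LL j := pvOff_mono LL hkj
        omega
      simp only [pvAdv, if_pos hcond]
      have harg : (pvOff LL k : Int) + PySem.Str.len (PySem.List.pyGetD lines (k : Int) "") + 1
          = ((pvOff LL (k + 1) : Nat) : Int) := by
        rw [hlen]
        have hsucc : pvOff LL (k + 1) = pvOff LL k + (LL[k]'(by simp [hLL]; omega)).length + 1 := by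
          apply pvOff_succ
        push_cast [hsucc]
        ring
      rw [harg]
      have hcast : ((k : Int) + 1) = ((k + 1 : Nat) : Int) := by push_cast; ring
      rw [hcast]
      exact ih (k + 1) j hkj hj pos h1 h2 (by omega)
    · have hkeq : k = j := by omega
      subst hkeq
      have hcond : ¬ ((pvOff LL k : Int) + PySem.Str.len (PySem.List.pyGetD lines (k : Int) "") < pos) := by
        rw [hlen]; omega
      simp only [pvAdv, if_neg hcond]

theorem pvOff_add (M : List (List Char)) (k d : Nat) :
    pvOff M (k + d) = pvOff M k + pvOff (M.drop k) d := by
  unfold pvOff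
  rw [List.take_add, List.map_append, List.sum_append]

theorem pvScan_eq (lines : List String) (P : List Char) (LL : List (List Char))
    (hLL : LL = lines.map (fun l => PySem.Chars.lower l.toList))
    (hn : '\n' ∉ P) (hne : lines ≠ []) :
    ∀ (fuel : Nat) (k0 k1 : Nat), k0 ≤ k1 → k1 ≤ lines.length → lines.length - k1 + 1 ≤ fuel →
      pvScan (PySem.Chars.join ['\n'] LL) P lines (k0 : Int) (pvOff LL k0 : Int)
          (PySem.Chars.findFrom (PySem.Chars.join ['\n'] LL) P (pvOff LL k1 : Int) none) fuel
        = pvG P (k1 : Int) (lines.drop k1) := by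
  subst hLL
  set LL := lines.map (fun l => PySem.Chars.lower l.toList) with hLL
  have hLLlen : LL.length = lines.length := by simp [hLL]
  have hLLne : LL ≠ [] := by
    intro h
    apply hne
    rw [h] at hLLlen
    cases lines with
    | nil => rfl
    | cons a b => simp at hLLlen
  intro fuel
  induction fuel with
  | zero => intro k0 k1 h01 hk hf; omega
  | succ fuel ih =>
    intro k0 k1 h01 hk hf
    by_cases hkn : k1 = lines.length
    · subst hkn
      have hbig : (PySem.Chars.join ['\n'] LL).length < pvOff LL lines.length := by
        rw [← hLLlen, pvOff_last LL hLLne]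
        omega
      rw [pvFindFrom_big _ _ _ hbig]
      simp [pvScan, List.drop_length, pvG]
    · have hklt : k1 < lines.length := lt_of_le_of_ne hk hkn
      have hkLL : k1 < LL.length := by omega
      have hoffle : pvOff LL k1 ≤ (PySem.Chars.join ['\n'] LL).length := by
        have := pvOff_add_len LL k1 hkLL
        omega
      rw [PySem.Chars.findFrom_natCast _ _ (pvOff LL k1) hoffle, pvOff_drop LL k1 hkLL]
      have hDlen : (LL.drop k1).length = lines.length - k1 := by simp [hLLlen]
      by_cases hd : (LL.drop k1).findIdx (fun p => PySem.Chars.isIn P p) < (LL.drop k1).length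
      · -- there is a further match; it sits in line j = k1 + d
        set d := (LL.drop k1).findIdx (fun p => PySem.Chars.isIn P p) with hdidx
        have hmatch : PySem.Chars.isIn P ((LL.drop k1)[d]'hd) = true := List.findIdx_getElem
        have hfailtake : ∀ p ∈ (LL.drop k1).take d, PySem.Chars.isIn P p = false := by
          intro p hp
          obtain ⟨i, hi, hig⟩ := List.getElem_of_mem hp
          have hid : i < d := by
            have := hi
            simp [List.length_take] at this
            omega
          have hpi : p = (LL.drop k1)[i]'(by omega) := by
            rw [← hig, List.getElem_take]
          rw [hpi]
          exact List.not_of_lt_findIdx hid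
        have hfind := pvFindJoin_first hn (LL.drop k1) d hd hfailtake hmatch
        have hfnn : 0 ≤ PySem.Chars.find ((LL.drop k1)[d]'hd) P := by
          rw [PySem.Chars.find_nonneg_iff]
          exact (PySem.Chars.isIn_iff_infix _ _).mp hmatch
        have hfle : PySem.Chars.find ((LL.drop k1)[d]'hd) P ≤ (((LL.drop k1)[d]'hd).length : Int) :=
          PySem.Chars.find_le_length _ _
        have hjlt : k1 + d < lines.length := by omega
        have hoffj : pvOff LL k1 + pvOff (LL.drop k1) d = pvOff LL (k1 + d) := (pvOff_add LL k1 d).symm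
        have hDd : (LL.drop k1)[d]'hd = LL[k1 + d]'(by omega) := List.getElem_drop
        rw [hfind]
        rw [if_neg (by omega)]
        have hposval : (pvOff LL k1 : Int) + ((pvOff (LL.drop k1) d : Int) + PySem.Chars.find ((LL.drop k1)[d]'hd) P)
            = (pvOff LL (k1 + d) : Int) + PySem.Chars.find ((LL.drop k1)[d]'hd) P := by
          push_cast [← hoffj]
          ring
        rw [hposval]
        simp only [pvScan]
        rw [if_neg (by omega)]
        rw [pvAdv_eq lines LL hLL lines.length k0 (k1 + d) (by omega) hjlt _
          (by omega)
          (by rw [← hDd]; omega)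
          (by omega)]
        simp only []
        have hlenj : PySem.Str.len (PySem.List.pyGetD lines ((k1 + d : Nat) : Int) "")
            = ((LL[k1 + d]'(by omega)).length : Int) := by
          rw [PySem.List.pyGetD_natCast, List.getD_eq_getElem _ _ hjlt]
          simp [hLL, PySem.Str.len, PySem.Chars.lower]
        have harg : ((pvOff LL (k1 + d) : Nat) : Int) + PySem.Str.len (PySem.List.pyGetD lines ((k1 + d : Nat) : Int) "") + 1
            = ((pvOff LL (k1 + d + 1) : Nat) : Int) := by
          rw [hlenj, pvOff_succ LL (k1 + d) (by omega)]
          push_cast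
          ring
        rw [harg]
        rw [ih (k1 + d) (k1 + d + 1) (by omega) (by omega) (by omega)]
        -- now the RHS side
        have hdlines : d < (lines.drop k1).length := by
          simp only [List.length_drop]
          have h := hd
          rw [hDlen] at h
          omega
        have hgfirst := pvG_first P (lines.drop k1) d hdlines (k1 : Int)
          (by
            intro l hl
            have hmem : PySem.Chars.lower l.toList ∈ (LL.drop k1).take d := by
              rw [hLL, ← List.map_drop, ← List.map_take]
              exact List.mem_map_of_mem hl
            exact hfailtake _ hmem)
          (by
            have he : (lines.drop k1)[d]'hdlines = lines[k1 + d]'hjlt :=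
              List.getElem_drop
            rw [he]
            have h2 : (LL.drop k1)[d]'hd = PySem.Chars.lower (lines[k1 + d]'hjlt).toList := by
              rw [hDd]
              simp [hLL]
            rw [← h2]
            exact hmatch)
        rw [hgfirst]
        have hdropdrop : (lines.drop k1).drop (d + 1) = lines.drop (k1 + d + 1) := by
          rw [List.drop_drop]
          rfl
        rw [hdropdrop]
        rfl
      · -- no further match: the find returns -1 and both sides are empty
        have hall : ∀ p ∈ LL.drop k1, PySem.Chars.isIn P p = false := by
          have hlen2 : (LL.drop k1).findIdx (fun p => PySem.Chars.isIn P p) = (LL.drop k1).length := by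
            have := List.findIdx_le_length (p := fun p => PySem.Chars.isIn P p) (xs := LL.drop k1)
            omega
          intro p hp
          have := List.findIdx_eq_length.mp hlen2 p hp
          simpa using this
        have hDne : LL.drop k1 ≠ [] := by
          intro h
          have := congrArg List.length h
          rw [hDlen] at this
          simp at this
          omega
        rw [pvFindJoin_none hn _ hDne hall]
        rw [if_pos rfl]
        simp only [pvScan, if_true]
        rw [pvG_nil P (lines.drop k1) _ (by
          intro l hl
          apply hall
          rw [hLL, ← List.map_drop]
          exact List.mem_map_of_mem hl)]

theorem pvLowerChar_newline : PySem.Chars.lowerChar '\n' = '\n' := by decide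

theorem pvNewline_toList : ("\n" : String).toList = ['\n'] := rfl

theorem pvLines_eq (s : String) :
    (PySem.Str.split? s "\n").getD [] = (pvSplitCh '\n' s.toList).map String.ofList := by
  unfold PySem.Str.split? PySem.Chars.split?
  rw [pvNewline_toList]
  simp [pvSplitOn_eq]

theorem pvText_eq (s : String) :
    PySem.Chars.lower s.toList
      = PySem.Chars.join ['\n']
          (((PySem.Str.split? s "\n").getD []).map (fun l => PySem.Chars.lower l.toList)) := by
  rw [pvLines_eq]
  have h1 : ((pvSplitCh '\n' s.toList).map String.ofList).map (fun l => PySem.Chars.lower l.toList)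
      = (pvSplitCh '\n' s.toList).map (List.map PySem.Chars.lowerChar) := by
    rw [List.map_map]
    apply List.map_congr_left
    intro a _
    simp [PySem.Chars.lower]
  rw [h1, ← pvSplitCh_map '\n' PySem.Chars.lowerChar pvLowerChar_newline
      (fun x h => pvLowerChar_eq_newline h)]
  have h2 : s.toList.map PySem.Chars.lowerChar = PySem.Chars.lower s.toList := rfl
  rw [h2, pvJoin_pvSplitCh]

theorem pvMs_eq (asm_text pattern : String) :
    (if PySem.Chars.isIn ['\n'] (PySem.Chars.lower pattern.toList) then []
     else pvScan (PySem.Chars.lower asm_text.toList) (PySem.Chars.lower pattern.toList)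
            ((PySem.Str.split? asm_text "\n").getD []) 0 0
            (PySem.Chars.find (PySem.Chars.lower asm_text.toList) (PySem.Chars.lower pattern.toList))
            (((PySem.Str.split? asm_text "\n").getD []).length + 1))
      = ((PySem.List.enumerate ((PySem.Str.split? asm_text "\n").getD []) 0).filter
            (fun p => PySem.Str.isIn (PySem.Str.lower pattern) (PySem.Str.lower p.2))).map (·.1) := by
  rw [pvG_eq_filter (PySem.Chars.lower pattern.toList) pattern rfl]
  set lines := (PySem.Str.split? asm_text "\n").getD [] with hlines
  set P := PySem.Chars.lower pattern.toList with hP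
  have hne : lines ≠ [] := by
    rw [hlines, pvLines_eq]
    simp only [ne_eq, List.map_eq_nil_iff]
    exact pvSplitCh_ne_nil '\n' asm_text.toList
  have hM : ∀ l ∈ lines, '\n' ∉ PySem.Chars.lower l.toList := by
    intro l hl
    rw [hlines, pvLines_eq] at hl
    obtain ⟨pp, hpp, rfl⟩ := List.mem_map.mp hl
    intro hmem
    have hh : PySem.Chars.lower (String.ofList pp).toList = pp.map PySem.Chars.lowerChar := by
      simp [PySem.Chars.lower]
    rw [hh] at hmem
    obtain ⟨y, hy, hy2⟩ := List.mem_map.mp hmem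
    exact pvNotMem_pvSplitCh '\n' asm_text.toList pp hpp (pvLowerChar_eq_newline hy2 ▸ hy)
  by_cases hnl : PySem.Chars.isIn ['\n'] P = true
  · rw [if_pos hnl]
    symm
    apply pvG_nil
    intro l hl
    have hmemP : '\n' ∈ P := (List.singleton_infix_iff '\n' P).mp ((PySem.Chars.isIn_iff_infix _ _).mp hnl)
    cases hIn : PySem.Chars.isIn P (PySem.Chars.lower l.toList) with
    | false => rfl
    | true =>
      exfalso
      apply hM l hl
      exact ((PySem.Chars.isIn_iff_infix _ _).mp hIn).subset hmemP
  · rw [if_neg hnl]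
    have hn : '\n' ∉ P := by
      intro hmem
      exact hnl ((PySem.Chars.isIn_iff_infix _ _).mpr ((List.singleton_infix_iff '\n' P).mpr hmem))
    have key := pvScan_eq lines P (lines.map (fun l => PySem.Chars.lower l.toList)) rfl hn hne
      (lines.length + 1) 0 0 (le_refl 0) (by omega) (by omega)
    simp only [pvOff_zero, Nat.cast_zero, List.drop_zero, PySem.Chars.findFrom_zero] at key
    rw [show PySem.Chars.lower asm_text.toList
        = PySem.Chars.join ['\n'] (lines.map (fun l => PySem.Chars.lower l.toList)) from by
      rw [hlines]; exact pvText_eq asm_text]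
    exact key

-- ---- A's scan, rewritten as collect-then-render over the same reference list ----
theorem pvALoop_eq (lines : List String) (pattern : String) (cb ca m : Int)
    (ps : List (Int × String)) (found : Int) :
    pvALoop lines pattern cb ca m ps found =
      (PySem.List.enumerate
          (((ps.filter (fun p => PySem.Str.isIn (PySem.Str.lower pattern) (PySem.Str.lower p.2))).map (·.1)).take
            (m - found).toNat) (found + 1)).flatMap (fun p =>
        ("\n--- Occurrence " ++ PySem.Int.toStr p.1 ++ " (line " ++ PySem.Int.toStr p.2 ++ ") ---")
        :: ((PySem.List.pyRange (max 0 (p.2 - cb)) (min (lines.length : Int) (p.2 + ca + 1)) 1).map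
              (fun j => (if j = p.2 then ">>>" else "   ") ++ " " ++ pvPad4 j ++ ": " ++ PySem.List.pyGetD lines j "")))
      ++ (if max 0 (m - found) <
            ((ps.filter (fun p => PySem.Str.isIn (PySem.Str.lower pattern) (PySem.Str.lower p.2))).length : Int)
          then ["  ... and more occurrences ..."] else []) := by
  induction ps generalizing found with
  | nil => simp [pvALoop]
  | cons p ps ih =>
    obtain ⟨i, line⟩ := p
    by_cases hm : PySem.Str.isIn (PySem.Str.lower pattern) (PySem.Str.lower line) = true
    · by_cases hf : found ≥ m
      · have h0 : (m - found).toNat = 0 := by omega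
        have h3 : List.filter (fun p => PySem.Str.isIn (PySem.Str.lower pattern) (PySem.Str.lower p.2)) ((i, line) :: ps)
            = (i, line) :: List.filter (fun p => PySem.Str.isIn (PySem.Str.lower pattern) (PySem.Str.lower p.2)) ps := by
          simp only [List.filter_cons, hm]
          simp
        simp only [pvALoop, if_pos hm, if_pos hf, h3, h0, List.take_zero,
          PySem.List.enumerate_nil, List.flatMap_nil, List.nil_append]
        rw [if_pos (by rw [List.length_cons]; push_cast; omega)]
      · have h1 : (m - found).toNat = (m - (found + 1)).toNat + 1 := by omega
        simp only [pvALoop, hm, if_true, hf, if_false, List.filter_cons, List.map_cons,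
          h1, List.take_succ_cons, PySem.List.enumerate_cons, List.flatMap_cons, ih]
        have h2 : (max 0 (m - found) <
              (((i, line) :: ps.filter (fun p => PySem.Str.isIn (PySem.Str.lower pattern) (PySem.Str.lower p.2))).length : Int)) =
            (max 0 (m - (found + 1)) <
              ((ps.filter (fun p => PySem.Str.isIn (PySem.Str.lower pattern) (PySem.Str.lower p.2))).length : Int)) := by
          apply propext
          rw [List.length_cons]
          push_cast
          constructor <;> intro h <;> omega
        simp only [h2, List.append_assoc]
    · have hmf : PySem.Str.isIn (PySem.Str.lower pattern) (PySem.Str.lower line) = false :=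
        Bool.not_eq_true _ ▸ (Bool.eq_false_iff.mpr hm)
      have h3 : List.filter (fun p => PySem.Str.isIn (PySem.Str.lower pattern) (PySem.Str.lower p.2)) ((i, line) :: ps)
          = List.filter (fun p => PySem.Str.isIn (PySem.Str.lower pattern) (PySem.Str.lower p.2)) ps := by
        simp only [List.filter_cons, hmf]
        simp
      simp only [pvALoop, if_neg hm, ih, h3]

-- ===== VERDICT (by name: the statement is the Claim_ definition above) =====
theorem find_context_around_pattern_spec : Claim_equal_find_context_around_pattern := by
  intro asm_text pattern cb ca m _
  unfold Spec_find_context_around_pattern find_context_around_pattern find_context_around_pattern_alt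
  simp only [pvALoop_eq, pvMs_eq]
  have h1 : (m - 0).toNat = (max 0 m : Int).toNat := by omega
  have h2 : max 0 (m - 0) = max 0 m := by omega
  simp only [h1, h2, zero_add, List.length_map, gt_iff_lt]
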